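-- pv_equiv track=rewrite | github.com/pinedance/python-quotes-finder | quotesfinder/text.py | invert_partiton
-- ===== SOURCE A (Python) =====
-- def invert_partiton( partitions, last_i, min_len=8 ):
--     init = 0
--     inverted_partitons = []
--     for b, e in partitions:
--         if b == 0 : continue
--         if (b - init) >= min_len:
--             inverted_partitons.append( (init, b) )
--         init = e
--     if (last_i - init) >= min_len:
--         inverted_partitons.append( (init, last_i) )
--
--     return inverted_partitons
-- ===== SOURCE B (Python) =====
-- def invert_partiton(partitions, last_i, min_len=8):
--     def gaps(rev, right):
--         # rev: remaining kept partitions in reverse order; right: current right boundary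
--         if not rev:
--             return [(0, right)] if right - 0 >= min_len else []
--         b, e = rev[0]
--         out = gaps(rev[1:], b)
--         if right - e >= min_len:
--             out.append((e, right))
--         return out
--     return gaps([p for p in reversed(partitions) if p[0] != 0], last_i)
-- ===== Notes on version B (the rewrite author's own statement) =====
-- stated objective: alternative
-- what changed: Replaces A's left-to-right accumulator loop (mutable init threaded forward, appends as it goes) by a right-to-left structural recursion: the non-zero-start partitions are reversed and a recursive helper computes the gap list passing the current right boundary down, emitting the gaps on the way back out.
import Mathlib
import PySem

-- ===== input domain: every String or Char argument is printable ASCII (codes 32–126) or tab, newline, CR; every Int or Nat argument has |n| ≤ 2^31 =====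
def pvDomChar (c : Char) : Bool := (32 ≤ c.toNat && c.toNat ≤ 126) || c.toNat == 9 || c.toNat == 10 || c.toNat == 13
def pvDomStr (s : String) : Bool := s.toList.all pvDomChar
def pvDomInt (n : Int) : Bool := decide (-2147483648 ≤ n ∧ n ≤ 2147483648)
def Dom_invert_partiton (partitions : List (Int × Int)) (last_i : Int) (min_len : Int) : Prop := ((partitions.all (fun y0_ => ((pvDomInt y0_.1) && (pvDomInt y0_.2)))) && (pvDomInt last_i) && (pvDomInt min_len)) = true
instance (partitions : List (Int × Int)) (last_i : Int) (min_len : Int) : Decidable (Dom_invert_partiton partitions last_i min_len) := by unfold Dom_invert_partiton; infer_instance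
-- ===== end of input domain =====

-- B is a right-to-left structural recursion over the reversed partition list instead of A's
-- forward accumulator loop; same O(n) cost, different decomposition (objective: alternative).

-- ===== PORT A =====
-- literal port of A: fold threading (init, acc); b == 0 skips both the append and the init update
def invert_partiton (partitions : List (Int × Int)) (last_i : Int) (min_len : Int) : List (Int × Int) :=
  let s := partitions.foldl
    (fun (st : Int × List (Int × Int)) p =>
      if p.1 == 0 then st
      else (p.2, if min_len ≤ p.1 - st.1 then st.2 ++ [(st.1, p.1)] else st.2))
    (0, [])
  if min_len ≤ last_i - s.1 then s.2 ++ [(s.1, last_i)] else s.2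

-- ===== PORT B =====
-- port of B's recursive helper 'gaps': recursion on the reversed kept list, right boundary passed down
def invert_partiton_gaps (min_len : Int) : List (Int × Int) → Int → List (Int × Int)
  | [], right => if min_len ≤ right - 0 then [(0, right)] else []
  | (b, e) :: rest, right =>
      let out := invert_partiton_gaps min_len rest b
      if min_len ≤ right - e then out ++ [(e, right)] else out

def invert_partiton_alt (partitions : List (Int × Int)) (last_i : Int) (min_len : Int) : List (Int × Int) :=
  invert_partiton_gaps min_len ((partitions.reverse).filter (fun p => !(p.1 == 0))) last_i

-- ===== PRECONDITION & SPEC =====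
def Spec_invert_partiton (partitions : List (Int × Int)) (last_i : Int) (min_len : Int) (out : List (Int × Int)) : Prop := out = invert_partiton_alt partitions last_i min_len
instance (partitions : List (Int × Int)) (last_i : Int) (min_len : Int) (out : List (Int × Int)) : Decidable (Spec_invert_partiton partitions last_i min_len out) := by unfold Spec_invert_partiton; infer_instance

-- ===== CLAIM =====
def Claim_equal_invert_partiton : Prop := ∀ (partitions : List (Int × Int)) (last_i : Int) (min_len : Int), Dom_invert_partiton partitions last_i min_len → Spec_invert_partiton partitions last_i min_len (invert_partiton partitions last_i min_len)

-- ===== LEMMAS AND PROOFS =====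

-- A's fold ignores zero-start pairs, so it equals the fold over the filtered list
theorem invert_partiton_fold_filter (min_len : Int) (ps : List (Int × Int)) (st : Int × List (Int × Int)) :
    ps.foldl
      (fun (st : Int × List (Int × Int)) p =>
        if p.1 == 0 then st
        else (p.2, if min_len ≤ p.1 - st.1 then st.2 ++ [(st.1, p.1)] else st.2)) st
    = (ps.filter (fun p => !(p.1 == 0))).foldl
      (fun (st : Int × List (Int × Int)) p =>
        if p.1 == 0 then st
        else (p.2, if min_len ≤ p.1 - st.1 then st.2 ++ [(st.1, p.1)] else st.2)) st := by
  induction ps generalizing st with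
  | nil => rfl
  | cons p ps ih =>
    rw [List.foldl_cons, List.filter_cons]
    by_cases hb : (p.1 == 0) = true
    · rw [if_pos hb, if_neg (by simp_all)]
      exact ih st
    · rw [if_neg hb, if_pos (show (!(p.1 == 0)) = true by simp_all), List.foldl_cons, if_neg hb]
      exact ih _

-- main bridge: on a zero-free list, A's fold+tail equals B's recursion on the reverse
theorem invert_partiton_kept (min_len : Int) (ks : List (Int × Int))
    (hks : ∀ p ∈ ks, ¬ p.1 = 0) (last : Int) :
    (let s := ks.foldl
        (fun (st : Int × List (Int × Int)) p =>
          if p.1 == 0 then st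
          else (p.2, if min_len ≤ p.1 - st.1 then st.2 ++ [(st.1, p.1)] else st.2))
        (0, [])
     if min_len ≤ last - s.1 then s.2 ++ [(s.1, last)] else s.2)
    = invert_partiton_gaps min_len ks.reverse last := by
  induction ks using List.reverseRecOn generalizing last with
  | nil =>
    simp only [List.foldl_nil, List.reverse_nil, invert_partiton_gaps]
    split <;> simp_all
  | append_singleton ks q ih =>
    have hq : ¬ q.1 = 0 := hks q (by simp)
    have hks' : ∀ p ∈ ks, ¬ p.1 = 0 := fun p hp => hks p (by simp [hp])
    obtain ⟨b, e⟩ := q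
    simp only [List.foldl_append, List.foldl_cons, List.foldl_nil,
      List.reverse_append, List.reverse_cons, List.reverse_nil, List.nil_append,
      List.cons_append, invert_partiton_gaps]
    simp only at hq
    simp only [beq_iff_eq, hq, if_false]
    rw [← ih hks' b]
    by_cases h1 : min_len ≤ b - (ks.foldl
        (fun (st : Int × List (Int × Int)) p =>
          if p.1 == 0 then st
          else (p.2, if min_len ≤ p.1 - st.1 then st.2 ++ [(st.1, p.1)] else st.2))
        (0, [])).1 <;>
      by_cases h2 : min_len ≤ last - e <;>
      simp [h2]

theorem invert_partiton_spec : Claim_equal_invert_partiton := by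
  intro ps last_i min_len _
  unfold Spec_invert_partiton invert_partiton invert_partiton_alt
  rw [invert_partiton_fold_filter, List.filter_reverse,
    ← invert_partiton_kept min_len (ps.filter (fun p => !(p.1 == 0)))
      (by intro p hp; have := List.of_mem_filter hp; simpa using this) last_i]
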